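-- pv_equiv track=rewrite | github.com/rladusdn02/Algorithm-codeit | 프로그래머스/0/181834. l로 만들기/l로 만들기.py | solution
-- ===== SOURCE A (Python) =====
-- def solution(myString):
--     answer = ''
--     for i in range(len(myString)):
--         if str(myString[i])<"l":
--             answer+="l"
--         else:
--             answer+=myString[i]
--     return answer
-- ===== SOURCE B (Python) =====
-- def solution(myString):
--     table = {i: 'l' for i in range(ord('l'))}
--     return myString.translate(table)
-- ===== Notes on version B (the rewrite author's own statement) =====
-- stated objective: faster
-- what changed: replaces the index loop with if/else string accumulation by a precomputed translation table (all ordinals below ord('l') map to 'l') applied in one str.translate pass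
import Mathlib
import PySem

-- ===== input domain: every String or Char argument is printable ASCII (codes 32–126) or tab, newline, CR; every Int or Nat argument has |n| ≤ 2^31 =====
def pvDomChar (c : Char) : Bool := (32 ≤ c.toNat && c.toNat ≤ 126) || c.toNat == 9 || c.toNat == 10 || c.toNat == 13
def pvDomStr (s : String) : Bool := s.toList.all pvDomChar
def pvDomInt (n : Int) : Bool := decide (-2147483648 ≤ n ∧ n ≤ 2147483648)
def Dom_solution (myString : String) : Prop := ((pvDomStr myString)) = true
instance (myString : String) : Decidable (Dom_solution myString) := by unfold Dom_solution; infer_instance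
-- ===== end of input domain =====

-- B replaces A's per-character if/else accumulation by a precomputed translation table
-- (every ordinal below 108 maps to 'l') applied in a single translate pass (objective: faster, measured).

-- ===== PORT A =====
-- answer accumulated as a list of chars (Python str = char sequence), packed with String.ofList at the end
def solution (myString : String) : String :=
  String.ofList
    ((PySem.List.pyRange 0 (PySem.Str.len myString) 1).foldl
      (fun answer i =>
        if PySem.List.pyGetD myString.toList i 'l' < 'l' then
          answer ++ ['l']
        else
          answer ++ [PySem.List.pyGetD myString.toList i 'l'])
      ([] : List Char))

-- ===== PORT B =====
-- table = {i: 'l' for i in range(ord('l'))}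
def solTable : PySem.Dict Int String :=
  (PySem.List.pyRange 0 108 1).foldl (fun d i => d.insert i "l") PySem.Dict.empty

-- myString.translate(table): each char is replaced by table[ord(c)] if present, else kept
def solution_alt (myString : String) : String :=
  PySem.Str.join "" (myString.toList.map (fun c => solTable.getD (c.toNat : Int) (String.ofList [c])))

-- ===== PRECONDITION & SPEC =====
def Spec_solution (myString : String) (out : String) : Prop := out = solution_alt myString
instance (myString : String) (out : String) : Decidable (Spec_solution myString out) := by unfold Spec_solution; infer_instance

-- ===== CLAIM (what is proved, stated in full; the proofs are below) =====
def Claim_equal_solution : Prop := ∀ (myString : String), Dom_solution myString → Spec_solution myString (solution myString)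

-- ===== LEMMAS AND PROOFS =====

-- Python's '<' on the one-char strings myString[i] and "l" is code-point comparison
theorem char_lt_l_iff (c : Char) : c < 'l' ↔ c.toNat < 108 := by
  rw [Char.lt_def, UInt32.lt_iff_toNat_lt]
  rfl

theorem get?_fold_insert (l : List Int) (d0 : PySem.Dict Int String) (k : Int) :
    (l.foldl (fun d i => d.insert i "l") d0).get? k
      = if k ∈ l then some "l" else d0.get? k := by
  induction l generalizing d0 with
  | nil => simp
  | cons i t ih =>
    simp only [List.foldl_cons, ih, PySem.Dict.get?_insert, List.mem_cons]
    by_cases hk : k ∈ t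
    · simp [hk]
    · by_cases hi : k = i <;> simp [hk, hi]

theorem solTable_getD (k : Int) (d : String) :
    solTable.getD k d = if 0 ≤ k ∧ k < 108 then "l" else d := by
  rw [PySem.Dict.getD_eq_get?_getD, solTable, get?_fold_insert]
  simp [PySem.List.mem_pyRange_one]
  by_cases h : 0 ≤ k ∧ k < 108 <;> simp [h]

theorem solution_A_eq (s : String) :
    solution s = String.ofList (s.toList.map (fun c => if c < 'l' then 'l' else c)) := by
  unfold solution
  simp only [PySem.Str.len_eq]
  rw [PySem.List.foldl_pyRange_zero_pyGetD' s.toList 'l'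
        (fun answer c => if c < 'l' then answer ++ ['l'] else answer ++ [c]) []]
  congr 1
  have : ∀ (cs : List Char) (acc : List Char),
      cs.foldl (fun answer c => if c < 'l' then answer ++ ['l'] else answer ++ [c]) acc
        = acc ++ cs.map (fun c => if c < 'l' then 'l' else c) := by
    intro cs
    induction cs with
    | nil => simp
    | cons c t ih => intro acc; by_cases h : c < 'l' <;> simp [h, ih]
  simpa using this s.toList []

theorem solution_B_eq (s : String) :
    solution_alt s = String.ofList (s.toList.map (fun c => if c < 'l' then 'l' else c)) := by
  unfold solution_alt
  have hmap : s.toList.map (fun c => solTable.getD (c.toNat : Int) (String.ofList [c]))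
      = (s.toList.map (fun c => if c < 'l' then 'l' else c)).map (fun c => String.ofList [c]) := by
    rw [List.map_map]
    apply List.map_congr_left
    intro c _
    simp only [Function.comp_def]
    rw [solTable_getD]
    simp only [char_lt_l_iff]
    by_cases h : c.toNat < 108
    · simp [h]
    · simp [h]
  rw [hmap]
  -- ''.join of singleton strings
  apply String.toList_injective
  simp only [PySem.Str.toList_join, List.map_map, Function.comp_def, String.toList_ofList]
  have hnil : "".toList = ([] : List Char) := rfl
  rw [hnil]
  have hj := PySem.Chars.join_nil_singletons (s.toList.map (fun c => if c < 'l' then 'l' else c))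
  rw [List.map_map] at hj
  simpa [Function.comp_def] using hj

-- ===== VERDICT (by name: the statement is the Claim_ definition above) =====
theorem solution_spec : Claim_equal_solution := by
  intro s _
  unfold Spec_solution
  rw [solution_A_eq, solution_B_eq]
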